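-- pv_equiv track=rewrite | github.com/frankier/finn-sense-clust | senseclust/groupings.py | filter_grouping_repeats
-- ===== SOURCE A (Python) =====
-- def filter_grouping_repeats(grouping):
--     seen_synsets = set()
--     filtered_synsets = set()
--     for group_num, synsets in grouping.items():
--         for synset in synsets:
--             if synset in seen_synsets:
--                 filtered_synsets.add(synset)
--             seen_synsets.add(synset)
--     for synsets in grouping.values():
--         for filtered_synset in filtered_synsets:
--             if filtered_synset in synsets:
--                 synsets.remove(filtered_synset)
--     return grouping, filtered_synsets
-- ===== SOURCE B (Python) =====
-- def filter_grouping_repeats(grouping):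
--     counts = {}
--     filtered_synsets = set()
--     for synsets in grouping.values():
--         for synset in synsets:
--             counts[synset] = counts.get(synset, 0) + 1
--             if counts[synset] == 2:
--                 filtered_synsets.add(synset)
--     result = {}
--     for group_num, synsets in grouping.items():
--         kept = []
--         dropped = set()
--         for synset in synsets:
--             if synset in filtered_synsets and synset not in dropped:
--                 dropped.add(synset)
--             else:
--                 kept.append(synset)
--         result[group_num] = kept
--     return result, filtered_synsets
-- ===== Notes on version B (the rewrite author's own statement) =====
-- stated objective: faster
-- what changed: B replaces A's seen/filtered incremental set marking with a running occurrence counter that flags a synset when its count reaches 2, and replaces A's per-filtered-synset membership-test-and-remove scans over each group with a single rebuilding pass per group that skips the first occurrence of each duplicated synset; B builds a fresh dict instead of mutating the argument in place.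
import Mathlib
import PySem

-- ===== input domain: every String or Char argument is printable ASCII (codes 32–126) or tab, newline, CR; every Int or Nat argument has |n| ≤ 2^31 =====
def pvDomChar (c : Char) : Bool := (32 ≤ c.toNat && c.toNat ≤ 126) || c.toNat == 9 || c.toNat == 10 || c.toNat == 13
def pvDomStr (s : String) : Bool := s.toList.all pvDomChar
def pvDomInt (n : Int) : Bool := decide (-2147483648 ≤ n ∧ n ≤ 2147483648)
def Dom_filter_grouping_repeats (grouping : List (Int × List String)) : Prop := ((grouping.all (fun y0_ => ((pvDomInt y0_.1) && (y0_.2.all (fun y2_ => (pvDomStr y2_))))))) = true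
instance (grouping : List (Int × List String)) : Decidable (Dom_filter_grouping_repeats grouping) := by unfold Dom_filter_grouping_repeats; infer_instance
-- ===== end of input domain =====

-- B counts occurrences and flags a synset when its count reaches 2, then rebuilds each group in one pass
-- skipping the first occurrence of each duplicated synset, instead of A's seen/filtered marking plus
-- per-filtered-synset remove scans.  Equivalence is about the RETURN value: A mutates its argument's lists
-- in place and returns the same dict, B returns a freshly built dict.

-- ===== PORT A =====
-- first loop: seen/filtered sets over all synsets (membership tested against seen BEFORE adding)
def pvStepA (st : PySem.Set String × PySem.Set String) (synset : String) :
    PySem.Set String × PySem.Set String :=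
  let filtered := if synset ∈ st.1 then PySem.Set.add st.2 synset else st.2
  (PySem.Set.add st.1 synset, filtered)

-- second loop body: `if filtered_synset in synsets: synsets.remove(filtered_synset)`
def pvRemove1 (synsets : List String) (fs : String) : List String :=
  if fs ∈ synsets then (PySem.List.remove? synsets fs).getD synsets else synsets

def filter_grouping_repeats (grouping : List (Int × List String)) :
    (List (Int × List String)) × List String :=
  let p := grouping.foldl
    (fun st kv => kv.2.foldl pvStepA st)
    ((PySem.Set.empty : PySem.Set String), (PySem.Set.empty : PySem.Set String))
  let grouping2 := grouping.map (fun kv => (kv.1, p.2.foldl pvRemove1 kv.2))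
  (grouping2, p.2)

-- ===== PORT B =====
-- first loop: counts[s] = counts.get(s, 0) + 1; flag s when its count reaches 2
def pvStepB (st : PySem.Dict String Int × PySem.Set String) (synset : String) :
    PySem.Dict String Int × PySem.Set String :=
  let counts := st.1.insert synset (st.1.getD synset 0 + 1)
  let filtered := if counts.getD synset 0 == 2 then PySem.Set.add st.2 synset else st.2
  (counts, filtered)

-- inner rebuild loop: (kept, dropped); skip the first occurrence of each filtered synset
def pvStepSkip (filtered : PySem.Set String)
    (st : List String × PySem.Set String) (synset : String) :
    List String × PySem.Set String :=
  if synset ∈ filtered ∧ ¬ synset ∈ st.2 then (st.1, PySem.Set.add st.2 synset)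
  else (st.1 ++ [synset], st.2)

def filter_grouping_repeats_alt (grouping : List (Int × List String)) :
    (List (Int × List String)) × List String :=
  let p := grouping.foldl
    (fun st kv => kv.2.foldl pvStepB st)
    ((PySem.Dict.empty : PySem.Dict String Int), (PySem.Set.empty : PySem.Set String))
  -- result[group_num] = kept : group_num are the (distinct) keys of the input dict, so inserts append
  let result := grouping.foldl
    (fun acc kv =>
      let r := kv.2.foldl (pvStepSkip p.2) (([] : List String), (PySem.Set.empty : PySem.Set String))
      acc ++ [(kv.1, r.1)]) []
  (result, p.2)

-- ===== PRECONDITION & SPEC =====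
def Spec_filter_grouping_repeats (grouping : List (Int × List String)) (out : (List (Int × List String)) × List String) : Prop := out = filter_grouping_repeats_alt grouping
instance (grouping : List (Int × List String)) (out : (List (Int × List String)) × List String) : Decidable (Spec_filter_grouping_repeats grouping out) := by unfold Spec_filter_grouping_repeats; infer_instance

-- ===== CLAIM (what is proved, stated in full; the proofs are below) =====
def Claim_equal_filter_grouping_repeats : Prop := ∀ (grouping : List (Int × List String)), Dom_filter_grouping_repeats grouping → Spec_filter_grouping_repeats grouping (filter_grouping_repeats grouping)

-- ===== LEMMAS AND PROOFS =====

-- nested per-group loops are a single loop over the flattened synset stream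
theorem pvFoldInner {σ : Type} (g : σ → String → σ) (grouping : List (Int × List String)) (init : σ) :
    grouping.foldl (fun st kv => kv.2.foldl g st) init = (grouping.flatMap (fun kv => kv.2)).foldl g init := by
  induction grouping generalizing init with
  | nil => rfl
  | cons kv rest ih => simp [List.flatMap_cons, List.foldl_append, ih]

-- invariant relating A's (seen, filtered) to B's (counts, filtered)
def pvInv (a : PySem.Set String × PySem.Set String) (b : PySem.Dict String Int × PySem.Set String) : Prop :=
  a.2 = b.2 ∧ ∀ s : String,
    (s ∈ a.1 ↔ 1 ≤ b.1.getD s 0) ∧ (s ∈ a.2 ↔ 2 ≤ b.1.getD s 0) ∧ 0 ≤ b.1.getD s 0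

theorem pvSetAddMem (s : PySem.Set String) (x : String) (h : x ∈ s) : PySem.Set.add s x = s := by
  simp [PySem.Set.add, h]

theorem pvInvStep (a : PySem.Set String × PySem.Set String) (b : PySem.Dict String Int × PySem.Set String)
    (x : String) (h : pvInv a b) : pvInv (pvStepA a x) (pvStepB b x) := by
  obtain ⟨hf, hinv⟩ := h
  obtain ⟨hx1, hx2, hx0⟩ := hinv x
  have hc : b.1.getD x 0 = 0 ∨ b.1.getD x 0 = 1 ∨ 2 ≤ b.1.getD x 0 := by omega
  constructor
  · -- the two filtered sets stay equal
    simp only [pvStepA, pvStepB]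
    rcases hc with h0 | h1 | h2
    · have hns : ¬ x ∈ a.1 := by rw [hx1]; omega
      simp [hns, hf, PySem.Dict.getD_insert_self, h0]
    · have hys : x ∈ a.1 := by rw [hx1]; omega
      simp [hys, hf, PySem.Dict.getD_insert_self, h1]
    · have hseen : x ∈ a.1 := by rw [hx1]; omega
      have hfil : x ∈ a.2 := by rw [hx2]; omega
      have hne : ¬ (b.1.getD x 0 + 1 = 2) := by omega
      simp [hseen, hf, PySem.Dict.getD_insert_self, hne, pvSetAddMem _ _ (hf ▸ hfil)]
  · intro s
    obtain ⟨hs1, hs2, hs0⟩ := hinv s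
    by_cases hsx : s = x
    · subst hsx
      refine ⟨?_, ?_, ?_⟩
      · simp only [pvStepA, pvStepB, PySem.Dict.getD_insert_self, PySem.Set.mem_add]
        simp
        omega
      · rcases hc with h0 | h1 | h2
        · have hns : ¬ s ∈ a.1 := by rw [hs1]; omega
          have hns2 : ¬ s ∈ a.2 := by rw [hs2]; omega
          simp only [pvStepA, pvStepB, PySem.Dict.getD_insert_self]
          simp [hns, hns2, h0]
        · have hys : s ∈ a.1 := by rw [hs1]; omega
          simp only [pvStepA, pvStepB, PySem.Dict.getD_insert_self]
          simp [hys, PySem.Set.mem_add, h1]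
        · have hys : s ∈ a.1 := by rw [hs1]; omega
          have hys2 : s ∈ a.2 := by rw [hs2]; omega
          simp only [pvStepA, pvStepB, PySem.Dict.getD_insert_self]
          simp [hys, hys2]
          omega
      · simp only [pvStepB, PySem.Dict.getD_insert_self]
        omega
    · have hgd : (b.1.insert x (b.1.getD x 0 + 1)).getD s 0 = b.1.getD s 0 := by
        rw [PySem.Dict.getD_insert]; simp [hsx]
      refine ⟨?_, ?_, ?_⟩ <;> simp only [pvStepA, pvStepB, hgd, PySem.Set.mem_add]
      · simp [hs1, hsx]
      · split <;> simp [PySem.Set.mem_add, hs2, hsx]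
      · exact hs0

theorem pvInvFold (l : List String) (a : PySem.Set String × PySem.Set String)
    (b : PySem.Dict String Int × PySem.Set String) (h : pvInv a b) :
    pvInv (l.foldl pvStepA a) (l.foldl pvStepB b) := by
  induction l generalizing a b with
  | nil => exact h
  | cons x xs ih => exact ih _ _ (pvInvStep a b x h)

theorem pvInvInit : pvInv (PySem.Set.empty, PySem.Set.empty) (PySem.Dict.empty, PySem.Set.empty) := by
  refine ⟨rfl, fun s => ?_⟩
  simp [PySem.Set.empty, PySem.Dict.getD_empty]

theorem pvFoldANodup (l : List String) (a : PySem.Set String × PySem.Set String)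
    (h1 : a.1.Nodup) (h2 : a.2.Nodup) :
    ((l.foldl pvStepA a).1.Nodup ∧ (l.foldl pvStepA a).2.Nodup) := by
  induction l generalizing a with
  | nil => exact ⟨h1, h2⟩
  | cons x xs ih =>
      refine ih _ (PySem.Set.nodup_add _ _ h1) ?_
      simp only [pvStepA]
      split
      · exact PySem.Set.nodup_add _ _ h2
      · exact h2

-- A's removal step is List.erase
theorem pvRemove1_eq_erase (l : List String) (s : String) : pvRemove1 l s = l.erase s := by
  by_cases h : s ∈ l
  · simp [pvRemove1, h, PySem.List.remove?_eq_some_erase l s h]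
  · simp [pvRemove1, h, List.erase_of_not_mem h]

-- skip the first occurrence of every element of S (proof-only reference recursion)
def pvSkip : List String → List String → List String
  | _, [] => []
  | S, x :: xs => if x ∈ S then pvSkip (S.erase x) xs else x :: pvSkip S xs

theorem pvFoldEraseNil (G : List String) : G.foldl (fun l s => l.erase s) [] = [] := by
  induction G with
  | nil => rfl
  | cons g gs ih => simpa using ih

theorem pvFoldEraseCons (x : String) (xs : List String) (G : List String) (hx : ¬ x ∈ G) :
    G.foldl (fun l s => l.erase s) (x :: xs) = x :: G.foldl (fun l s => l.erase s) xs := by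
  induction G generalizing xs with
  | nil => rfl
  | cons g gs ih =>
      have hgx : g ≠ x := by rintro rfl; exact hx (by simp)
      have hx' : ¬ x ∈ gs := fun h => hx (by simp [h])
      simp only [List.foldl_cons]
      rw [List.erase_cons_tail (by simp [Ne.symm hgx])]
      exact ih (xs.erase g) hx'

theorem pvFoldErase_eq_skip (lst G : List String) (hG : G.Nodup) :
    G.foldl (fun l s => l.erase s) lst = pvSkip G lst := by
  induction lst generalizing G with
  | nil => simpa [pvSkip] using pvFoldEraseNil G
  | cons x xs ih =>
      by_cases hx : x ∈ G
      · have hperm : G.Perm (x :: G.erase x) := List.perm_cons_erase hx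
        haveI : RightCommutative (fun (l : List String) s => l.erase s) :=
          ⟨fun l a b => List.erase_comm a b⟩
        have heq : G.foldl (fun l s => l.erase s) (x :: xs)
            = (x :: G.erase x).foldl (fun l s => l.erase s) (x :: xs) :=
          hperm.foldl_eq _
        rw [heq]
        simp only [List.foldl_cons, List.erase_cons_head]
        rw [ih (G.erase x) (hG.erase x)]
        simp [pvSkip, hx]
      · rw [pvFoldEraseCons x xs G hx, ih G hG]
        simp [pvSkip, hx]

-- B's rebuild loop computes pvSkip of the not-yet-dropped filtered synsets
theorem pvStepSkip_fold (F : PySem.Set String) (hF : F.Nodup) (lst : List String) :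
    ∀ (D : PySem.Set String) (kept : List String),
    (lst.foldl (pvStepSkip F) (kept, D)).1
      = kept ++ pvSkip (F.filter (fun y => decide (¬ y ∈ D))) lst := by
  induction lst with
  | nil => intro D kept; simp [pvSkip]
  | cons x xs ih =>
      intro D kept
      by_cases hc : x ∈ F ∧ ¬ x ∈ D
      · have hset : F.filter (fun y => decide (¬ y ∈ PySem.Set.add D x))
            = (F.filter (fun y => decide (¬ y ∈ D))).erase x := by
          rw [(hF.filter _).erase_eq_filter]
          rw [List.filter_filter]
          apply List.filter_congr
          intro y _
          by_cases hyD : y ∈ D <;> by_cases hyx : y = x <;>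
            simp [PySem.Set.mem_add, hyD, hyx]
        simp only [List.foldl_cons, pvStepSkip, if_pos hc]
        rw [ih (PySem.Set.add D x) kept, hset]
        simp [pvSkip]
        intro h
        exact (False.elim (hc.2 (h hc.1)))
      · simp only [List.foldl_cons, pvStepSkip, if_neg hc]
        rw [ih D (kept ++ [x])]
        simp [pvSkip]
        intro h1 h2
        exact (False.elim (hc ⟨h1, h2⟩))

-- per-group equality of the two second passes
theorem pvGroup_eq (F : PySem.Set String) (hF : F.Nodup) (lst : List String) :
    F.foldl pvRemove1 lst = (lst.foldl (pvStepSkip F) ([], PySem.Set.empty)).1 := by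
  have h1 : F.foldl pvRemove1 lst = F.foldl (fun l s => l.erase s) lst := by
    have hfn : pvRemove1 = fun l s => l.erase s :=
      funext fun l => funext fun s => pvRemove1_eq_erase l s
    rw [hfn]
  rw [h1, pvFoldErase_eq_skip lst F hF, pvStepSkip_fold F hF lst PySem.Set.empty []]
  have hfil : F.filter (fun y => decide (¬ y ∈ (PySem.Set.empty : PySem.Set String))) = F := by
    apply List.filter_eq_self.2
    intro y _; simp [PySem.Set.empty]
  rw [hfil]
  simp

theorem pvFoldAppend (grouping : List (Int × List String)) (h : Int × List String → List String) :
    ∀ acc : List (Int × List String),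
    grouping.foldl (fun acc kv => acc ++ [(kv.1, h kv)]) acc
      = acc ++ grouping.map (fun kv => (kv.1, h kv)) := by
  induction grouping with
  | nil => intro acc; simp
  | cons kv rest ih => intro acc; simp [ih]

-- ===== VERDICT (by name: the statement is the Claim_ definition above) =====
theorem filter_grouping_repeats_spec : Claim_equal_filter_grouping_repeats := by
  intro grouping _
  unfold Spec_filter_grouping_repeats filter_grouping_repeats filter_grouping_repeats_alt
  have hA : grouping.foldl (fun st kv => kv.2.foldl pvStepA st)
      ((PySem.Set.empty : PySem.Set String), (PySem.Set.empty : PySem.Set String))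
      = (grouping.flatMap (fun kv => kv.2)).foldl pvStepA (PySem.Set.empty, PySem.Set.empty) :=
    pvFoldInner pvStepA grouping _
  have hB : grouping.foldl (fun st kv => kv.2.foldl pvStepB st)
      ((PySem.Dict.empty : PySem.Dict String Int), (PySem.Set.empty : PySem.Set String))
      = (grouping.flatMap (fun kv => kv.2)).foldl pvStepB (PySem.Dict.empty, PySem.Set.empty) :=
    pvFoldInner pvStepB grouping _
  have hinv := pvInvFold (grouping.flatMap (fun kv => kv.2)) _ _ pvInvInit
  have hfeq : ((grouping.flatMap (fun kv => kv.2)).foldl pvStepA (PySem.Set.empty, PySem.Set.empty)).2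
      = ((grouping.flatMap (fun kv => kv.2)).foldl pvStepB (PySem.Dict.empty, PySem.Set.empty)).2 := hinv.1
  have hnd : ((grouping.flatMap (fun kv => kv.2)).foldl pvStepA (PySem.Set.empty, PySem.Set.empty)).2.Nodup :=
    (pvFoldANodup (grouping.flatMap (fun kv => kv.2)) _ List.nodup_nil List.nodup_nil).2
  simp only [hA, hB, ← hfeq]
  rw [pvFoldAppend grouping _ []]
  simp only [List.nil_append, Prod.mk.injEq, and_true]
  apply List.map_congr_left
  intro kv _
  rw [pvGroup_eq _ hnd kv.2]
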